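-- pv_equiv track=rewrite | github.com/StasDen/dp_algo | dp_algos/mine.py | collect_gold
-- ===== SOURCE A (Python) =====
-- def collect_gold(gold: list[list[int]], x: int, y: int, n: int, m: int, dp: list[list[int]]) -> int:
--     # Base case
--     if x < 0 or x == n or y == m:
--         return 0
--
--     # If we have already computed value in dp arr - returning it
--     if dp[x][y] != -1:
--         return dp[x][y]
--
--     # Possible moves from current position
--     right_upper: int = collect_gold(gold, x - 1, y + 1, n, m, dp)
--     right: int = collect_gold(gold, x, y + 1, n, m, dp)
--     right_bottom: int = collect_gold(gold, x + 1, y + 1, n, m, dp)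
--
--     # Storing move which get us max gold and returning it
--     dp[x][y]: int = gold[x][y] + max(max(right_upper, right_bottom), right)
--     return dp[x][y]
-- ===== SOURCE B (Python) =====
-- def collect_gold(gold: list[list[int]], x: int, y: int, n: int, m: int, dp: list[list[int]]) -> int:
--     # Bottom-up tabulation; does NOT mutate dp (pre-seeded dp cells != -1 are respected as memo input).
--     if x < 0 or x == n or y == m:
--         return 0
--
--     def cell(r: int, c: int, nxt: list[int]) -> int:
--         v = dp[r][c]
--         if v == -1:
--             v = gold[r][c] + max(nxt[r], nxt[r + 1], nxt[r + 2])
--         return v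
--
--     nxt = [0] * (n + 2)  # padded values of column c+1: nxt[r+1] is the value at row r
--     for c in range(m - 1, y - 1, -1):
--         nxt = [0] + [cell(r, c, nxt) for r in range(n)] + [0]
--     return nxt[x + 1]
-- ===== Notes on version B (the rewrite author's own statement) =====
-- stated objective: alternative
-- what changed: Replaces the memoized top-down recursion that mutates dp with an iterative bottom-up tabulation that sweeps columns right-to-left keeping one padded rolling array, reading dp only as memo input and never writing it.
-- outside the precondition, e.g. on collect_gold([[3, 0], [0, 2]], 1, -2, 2, 2, [[-1, -1], [-1, -1]]): A returns 5, B returns 7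
import Mathlib
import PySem

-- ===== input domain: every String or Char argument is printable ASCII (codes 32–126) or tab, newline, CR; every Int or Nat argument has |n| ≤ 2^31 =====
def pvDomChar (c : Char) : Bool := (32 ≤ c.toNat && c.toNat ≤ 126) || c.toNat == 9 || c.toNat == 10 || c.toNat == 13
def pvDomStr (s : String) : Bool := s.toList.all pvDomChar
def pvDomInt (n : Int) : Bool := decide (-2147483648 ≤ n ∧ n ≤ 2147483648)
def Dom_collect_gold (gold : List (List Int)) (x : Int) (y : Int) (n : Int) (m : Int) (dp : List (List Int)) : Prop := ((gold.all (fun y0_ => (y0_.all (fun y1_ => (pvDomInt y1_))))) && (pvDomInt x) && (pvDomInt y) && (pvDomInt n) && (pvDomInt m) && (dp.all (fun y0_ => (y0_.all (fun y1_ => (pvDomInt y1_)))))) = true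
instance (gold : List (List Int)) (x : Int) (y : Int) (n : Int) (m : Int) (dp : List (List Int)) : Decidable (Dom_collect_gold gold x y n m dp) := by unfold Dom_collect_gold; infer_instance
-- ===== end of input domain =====

-- B replaces A's memoized top-down recursion (which mutates dp) by a bottom-up right-to-left
-- column tabulation over one padded rolling array; B never writes dp, so the equivalence proved
-- here is about the RETURN value only (A's in-place writes to dp are not reproduced by B).

-- ===== PORT A =====
-- xs[r][c] read with default 0; exact for 0 ≤ r < len xs, 0 ≤ c < len (xs[r]) — Pre_ keeps all
-- reads of both ports inside that range (outside it Python A raises or wraps, excluded by Pre_).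
def pvAt (xs : List (List Int)) (r c : Int) : Int :=
  PySem.List.pyGetD (PySem.List.pyGetD xs r []) c 0

-- dp[r][c] = v; exact for in-range nonnegative r, c (guaranteed by Pre_ at every write A makes)
def pvSet (xs : List (List Int)) (r c : Int) (v : Int) : List (List Int) :=
  PySem.List.pySetD xs r (PySem.List.pySetD (PySem.List.pyGetD xs r []) c v)

-- A's recursion, literal; the state (return value, dp) is threaded explicitly since Lean lists
-- are immutable. y strictly increases toward m, so fuel (m - y).toNat + 1 suffices on Pre_.
def collect_gold_go (gold : List (List Int)) (n m : Int) :
    Nat → Int → Int → List (List Int) → Int × List (List Int)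
  | 0, _, _, dp => (0, dp)
  | fuel + 1, x, y, dp =>
    if x < 0 ∨ x = n ∨ y = m then (0, dp)
    else
      let v := pvAt dp x y
      if v ≠ -1 then (v, dp)
      else
        let p1 := collect_gold_go gold n m fuel (x - 1) (y + 1) dp          -- right_upper
        let p2 := collect_gold_go gold n m fuel x (y + 1) p1.2              -- right
        let p3 := collect_gold_go gold n m fuel (x + 1) (y + 1) p2.2        -- right_bottom
        let val := pvAt gold x y + max (max p1.1 p3.1) p2.1
        (val, pvSet p3.2 x y val)

def collect_gold (gold : List (List Int)) (x : Int) (y : Int) (n : Int) (m : Int) (dp : List (List Int)) : Int :=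
  (collect_gold_go gold n m ((m - y).toNat + 1) x y dp).1

-- ===== PORT B =====
-- cell(r, c, nxt) of Source B
def pvCell (gold dp : List (List Int)) (c : Int) (nxt : List Int) (r : Int) : Int :=
  let v := pvAt dp r c
  if v = -1 then
    pvAt gold r c +
      max (max (PySem.List.pyGetD nxt r 0) (PySem.List.pyGetD nxt (r + 1) 0))
        (PySem.List.pyGetD nxt (r + 2) 0)
  else v

def collect_gold_alt (gold : List (List Int)) (x : Int) (y : Int) (n : Int) (m : Int) (dp : List (List Int)) : Int :=
  if x < 0 ∨ x = n ∨ y = m then 0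
  else
    let nxt :=
      (PySem.List.pyRange (m - 1) (y - 1) (-1)).foldl
        (fun nxt c => 0 :: (PySem.List.pyRange 0 n 1).map (pvCell gold dp c nxt) ++ [0])
        (List.replicate (n + 2).toNat 0)
    PySem.List.pyGetD nxt (x + 1) 0

-- ===== PRECONDITION & SPEC =====
-- Pre_ admits every base-case input (A returns 0 there untouched) and the consistent non-base
-- inputs: 0 ≤ x < n, 0 ≤ y < m with an at-least-n×m grid. It excludes (1) inputs on which A's
-- indexing raises IndexError, and (2) the accidental corners where A returns only through
-- Python negative-index wraparound (y < 0: A's memo writes alias real columns) or through an n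
-- inconsistent with the table height (a memo hit at a row ≥ n): there B's value (or IndexError)
-- is as defensible as A's — neither behaviour is one a caller would specify.
def Pre_collect_gold (gold : List (List Int)) (x : Int) (y : Int) (n : Int) (m : Int) (dp : List (List Int)) : Prop :=
  (x < 0 ∨ x = n ∨ y = m) ∨
    (0 ≤ x ∧ x < n ∧ 0 ≤ y ∧ y < m ∧ n ≤ (gold.length : Int) ∧ n ≤ (dp.length : Int) ∧
      (∀ row ∈ gold.take n.toNat, m ≤ (row.length : Int)) ∧
      (∀ row ∈ dp.take n.toNat, m ≤ (row.length : Int)))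
instance (gold : List (List Int)) (x : Int) (y : Int) (n : Int) (m : Int) (dp : List (List Int)) : Decidable (Pre_collect_gold gold x y n m dp) := by unfold Pre_collect_gold; infer_instance

def pvWitness_collect_gold : List (List Int) × Int × Int × Int × Int × List (List Int) :=
  ([[1, 2], [3, 4]], 0, 0, 2, 2, [[-1, -1], [-1, -1]])

def Spec_collect_gold (gold : List (List Int)) (x : Int) (y : Int) (n : Int) (m : Int) (dp : List (List Int)) (out : Int) : Prop := out = collect_gold_alt gold x y n m dp
instance (gold : List (List Int)) (x : Int) (y : Int) (n : Int) (m : Int) (dp : List (List Int)) (out : Int) : Decidable (Spec_collect_gold gold x y n m dp out) := by unfold Spec_collect_gold; infer_instance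

-- ===== CLAIM (what is proved, stated in full; the proofs are below) =====
def Claim_equal_collect_gold : Prop := ∀ (gold : List (List Int)) (x : Int) (y : Int) (n : Int) (m : Int) (dp : List (List Int)), Dom_collect_gold gold x y n m dp → Pre_collect_gold gold x y n m dp → Spec_collect_gold gold x y n m dp (collect_gold gold x y n m dp)

-- ===== LEMMAS AND PROOFS =====

-- The value function both programs compute: memo-respecting recurrence over the ORIGINAL dp.
def pvV (gold dp : List (List Int)) (n m : Int) : Nat → Int → Int → Int
  | 0, _, _ => 0
  | fuel + 1, r, c =>
    if r < 0 ∨ r = n ∨ c = m then 0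
    else if pvAt dp r c ≠ -1 then pvAt dp r c
    else
      pvAt gold r c +
        max (max (pvV gold dp n m fuel (r - 1) (c + 1)) (pvV gold dp n m fuel (r + 1) (c + 1)))
          (pvV gold dp n m fuel r (c + 1))

lemma pvV_eq (gold dp : List (List Int)) (n m : Int) (fuel : Nat) (r c : Int) :
    pvV gold dp n m (fuel + 1) r c =
      if r < 0 ∨ r = n ∨ c = m then 0
      else if pvAt dp r c ≠ -1 then pvAt dp r c
      else
        pvAt gold r c +
          max (max (pvV gold dp n m fuel (r - 1) (c + 1)) (pvV gold dp n m fuel (r + 1) (c + 1)))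
            (pvV gold dp n m fuel r (c + 1)) := rfl

-- read/write helpers on the Nat level
lemma pvAt_toNat (xs : List (List Int)) (r c : Int) (hr : 0 ≤ r) (hc : 0 ≤ c) :
    pvAt xs r c = ((xs.getD r.toNat []).getD c.toNat 0) := by
  simp [pvAt, PySem.List.pyGetD_of_nonneg _ _ hr, PySem.List.pyGetD_of_nonneg _ _ hc,
    List.getD]

lemma getD_set_list {α : Type} (xs : List α) (i j : Nat) (v d : α) :
    (xs.set i v).getD j d = if i = j ∧ i < xs.length then v else xs.getD j d := by
  rcases Nat.lt_or_ge j xs.length with hj | hj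
  · by_cases hij : i = j
    · subst hij
      by_cases hi : i < xs.length
      · simp [List.getD, hi]
      · omega
    · simp [List.getD, List.getElem?_set_ne hij, hij]
  · have h1 : (xs.set i v).length ≤ j := by simp [hj]
    rw [List.getD_eq_default _ _ h1, List.getD_eq_default _ _ hj]
    have : ¬ (i = j ∧ i < xs.length) := by omega
    simp [this]

lemma pvAt_pvSet (xs : List (List Int)) (r c r' c' v : Int)
    (hr : 0 ≤ r) (hc : 0 ≤ c) (hr' : 0 ≤ r') (hc' : 0 ≤ c')
    (hrl : r.toNat < xs.length) (hcl : c.toNat < (xs.getD r.toNat []).length) :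
    pvAt (pvSet xs r c v) r' c' =
      if r' = r ∧ c' = c then v else pvAt xs r' c' := by
  have hset : pvSet xs r c v = xs.set r.toNat ((xs.getD r.toNat []).set c.toNat v) := by
    simp [pvSet, PySem.List.pySetD_of_nonneg _ _ hr, PySem.List.pySetD_of_nonneg _ _ hc,
      PySem.List.pyGetD_of_nonneg _ _ hr, List.getD]
  rw [pvAt_toNat _ _ _ hr' hc', pvAt_toNat _ _ _ hr' hc', hset, getD_set_list]
  by_cases h1 : r' = r
  · rw [if_pos ⟨by omega, hrl⟩, getD_set_list]
    by_cases h2 : c' = c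
    · rw [if_pos ⟨by omega, hcl⟩, if_pos ⟨h1, h2⟩]
    · rw [if_neg (fun hx => h2 (by omega)), if_neg (fun hx => h2 hx.2), h1]
  · rw [if_neg (fun hx => h1 (by omega)), if_neg (fun hx => h1 hx.1)]

lemma length_pvSet (xs : List (List Int)) (r c v : Int) (hr : 0 ≤ r) :
    (pvSet xs r c v).length = xs.length := by
  simp [pvSet, PySem.List.pySetD_of_nonneg _ _ hr]

lemma rowlen_pvSet (xs : List (List Int)) (r c v : Int) (hr : 0 ≤ r) (hc : 0 ≤ c) (i : Nat) :
    ((pvSet xs r c v).getD i []).length = (xs.getD i []).length := by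
  have hset : pvSet xs r c v = xs.set r.toNat ((xs.getD r.toNat []).set c.toNat v) := by
    simp [pvSet, PySem.List.pySetD_of_nonneg _ _ hr, PySem.List.pySetD_of_nonneg _ _ hc,
      PySem.List.pyGetD_of_nonneg _ _ hr, List.getD]
  rw [hset, getD_set_list]
  split_ifs with h
  · obtain ⟨h1, _⟩ := h; subst h1; simp
  · rfl

-- invariant carried by A's threaded dp state
def pvInv (gold dp : List (List Int)) (n m y : Int) (dp' : List (List Int)) : Prop :=
  dp'.length = dp.length ∧ (∀ i : Nat, (dp'.getD i []).length = (dp.getD i []).length) ∧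
    ∀ r c : Int, 0 ≤ r → r < n → y ≤ c → c < m →
      (pvAt dp' r c = pvAt dp r c ∨
        pvAt dp' r c = pvV gold dp n m ((m - c).toNat + 1) r c)

-- A's recursion returns pvV and preserves the invariant
lemma go_spec (gold dp : List (List Int)) (n m y : Int)
    (hd : n ≤ (dp.length : Int))
    (hdr : ∀ row ∈ dp.take n.toNat, m ≤ (row.length : Int)) (hy0 : 0 ≤ y) :
    ∀ (fuel : Nat) (r c : Int) (dp' : List (List Int)), pvInv gold dp n m y dp' →
      (m - c).toNat < fuel → y ≤ c → c ≤ m → -1 ≤ r → r ≤ n →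
      (collect_gold_go gold n m fuel r c dp').1 = pvV gold dp n m ((m - c).toNat + 1) r c ∧
        pvInv gold dp n m y (collect_gold_go gold n m fuel r c dp').2 := by
  have hrow : ∀ i : Nat, (i : Int) < n → m ≤ ((dp.getD i []).length : Int) := by
    intro i hi
    have hi' : i < dp.length := by omega
    have hget : dp.getD i [] = dp[i] := List.getD_eq_getElem dp [] hi'
    have hmem : dp[i] ∈ dp.take n.toNat := by
      have hi'' : i < (dp.take n.toNat).length := by simp; omega
      have : (dp.take n.toNat)[i] = dp[i] := List.getElem_take
      rw [← this]
      exact List.getElem_mem hi''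
    rw [hget]
    exact hdr _ hmem
  intro fuel
  induction fuel with
  | zero => intro r c dp' _ hf; omega
  | succ fuel ih =>
    intro r c dp' hInv hf hyc hcm hr1 hr2
    by_cases hb : r < 0 ∨ r = n ∨ c = m
    · have hgo : collect_gold_go gold n m (fuel + 1) r c dp' = (0, dp') := by
        simp only [collect_gold_go, if_pos hb]
      rw [hgo, pvV_eq, if_pos hb]
      exact ⟨rfl, hInv⟩
    · have hr0 : 0 ≤ r := by omega
      have hrn : r < n := by omega
      have hc0 : 0 ≤ c := by omega
      have hcm' : c < m := by omega
      obtain ⟨hL, hRL, hCells⟩ := hInv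
      by_cases hv : pvAt dp' r c = -1
      · -- compute branch
        have hdpv : pvAt dp r c = -1 := by
          by_cases hdd : pvAt dp r c = -1
          · exact hdd
          · rcases hCells r c hr0 hrn hyc hcm' with h | h
            · rw [hv] at h; omega
            · rw [pvV_eq, if_neg hb, if_pos hdd] at h
              rw [hv] at h; omega
        obtain ⟨e1, I1⟩ := ih (r - 1) (c + 1) dp' ⟨hL, hRL, hCells⟩ (by omega) (by omega)
          (by omega) (by omega) (by omega)
        obtain ⟨e2, I2⟩ := ih r (c + 1) _ I1 (by omega) (by omega) (by omega) (by omega) (by omega)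
        obtain ⟨e3, I3⟩ := ih (r + 1) (c + 1) _ I2 (by omega) (by omega) (by omega) (by omega)
          (by omega)
        set p1 := collect_gold_go gold n m fuel (r - 1) (c + 1) dp' with hp1
        set p2 := collect_gold_go gold n m fuel r (c + 1) p1.2 with hp2
        set p3 := collect_gold_go gold n m fuel (r + 1) (c + 1) p2.2 with hp3
        set val := pvAt gold r c + max (max p1.1 p3.1) p2.1 with hvaldef
        have hgo : collect_gold_go gold n m (fuel + 1) r c dp' = (val, pvSet p3.2 r c val) := by
          simp only [collect_gold_go]
          rw [if_neg hb]
          simp only [hv, ne_eq, not_true_eq_false, if_false, ← hp1, ← hp2, ← hp3]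
          rw [← hvaldef]
        obtain ⟨hL3, hRL3, hC3⟩ := I3
        have hrl : r.toNat < p3.2.length := by omega
        have hcl : c.toNat < (p3.2.getD r.toNat []).length := by
          rw [hRL3 r.toNat]
          have := hrow r.toNat (by omega)
          omega
        have hvalV : val = pvV gold dp n m ((m - c).toNat + 1) r c := by
          rw [pvV_eq, if_neg hb, if_neg (by simpa using hdpv)]
          rw [hvaldef, e1, e2, e3,
            (by omega : (m - c).toNat = (m - (c + 1)).toNat + 1)]
        refine ⟨by rw [hgo, ← hvalV], ?_⟩
        rw [hgo]
        refine ⟨by rw [length_pvSet _ _ _ _ hr0]; omega, ?_, ?_⟩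
        · intro i
          rw [rowlen_pvSet _ _ _ _ hr0 hc0 i]
          exact hRL3 i
        · intro r' c' hr'0 hr'n hyc' hc'm
          rw [pvAt_pvSet _ _ _ _ _ _ hr0 hc0 hr'0 (by omega) hrl hcl]
          split_ifs with he
          · right
            rw [he.1, he.2]
            exact hvalV
          · exact hC3 r' c' hr'0 hr'n hyc' hc'm
      · -- memo branch
        have hgo : collect_gold_go gold n m (fuel + 1) r c dp' = (pvAt dp' r c, dp') := by
          simp only [collect_gold_go]
          rw [if_neg hb]
          simp [hv]
        have hval : pvAt dp' r c = pvV gold dp n m ((m - c).toNat + 1) r c := by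
          rcases hCells r c hr0 hrn hyc hcm' with h | h
          · rw [h] at hv ⊢
            rw [pvV_eq, if_neg hb, if_pos hv]
          · exact h
        rw [hgo]
        exact ⟨hval, hL, hRL, hCells⟩

-- B's rolling array represents the pvV column c
def pvRep (gold dp : List (List Int)) (n m c : Int) (nxt : List Int) : Prop :=
  nxt.length = n.toNat + 2 ∧
    ∀ r : Int, -1 ≤ r → r ≤ n →
      PySem.List.pyGetD nxt (r + 1) 0 = pvV gold dp n m ((m - c).toNat + 1) r c

lemma rep_init (gold dp : List (List Int)) (n m : Int) (hn : 0 ≤ n) :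
    pvRep gold dp n m m (List.replicate (n + 2).toNat 0) := by
  refine ⟨by simp; omega, ?_⟩
  intro r h1 h2
  have hv : pvV gold dp n m ((m - m).toNat + 1) r m = 0 := by simp [pvV]
  rw [hv, PySem.List.pyGetD_of_nonneg _ _ (by omega : (0:Int) ≤ r + 1)]
  simp [List.getD, List.getElem?_replicate]
  split <;> rfl

lemma rep_step (gold dp : List (List Int)) (n m c : Int) (nxt : List Int)
    (hcm : c < m) (h : pvRep gold dp n m (c + 1) nxt) :
    pvRep gold dp n m c (0 :: (PySem.List.pyRange 0 n 1).map (pvCell gold dp c nxt) ++ [0]) := by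
  obtain ⟨hlen, hrep⟩ := h
  have hL : ((PySem.List.pyRange 0 n 1).map (pvCell gold dp c nxt)).length = n.toNat := by
    simp [PySem.List.length_pyRange_one]
  refine ⟨by simp [hL], ?_⟩
  intro r h1 h2
  rcases eq_or_lt_of_le h1 with h1' | h1'
  · -- r = -1 : padding cell, value 0 = pvV (base, r < 0)
    rw [← h1']
    simp [pvV, PySem.List.pyGetD_zero_cons]
  · rcases eq_or_lt_of_le h2 with h2' | h2'
    · -- r = n : padding cell, value 0 = pvV (base, r = n)
      subst h2'
      rw [PySem.List.pyGetD_of_nonneg _ _ (by omega : (0:Int) ≤ r + 1)]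
      have ht : (r + 1).toNat = r.toNat + 1 := by omega
      rw [ht, List.getD_append_right _ _ _ _ (by simp [hL])]
      simp [pvV, hL]
    · -- 0 ≤ r < n : the mapped cell
      have hr0 : 0 ≤ r := by omega
      rw [PySem.List.pyGetD_of_nonneg _ _ (by omega : (0:Int) ≤ r + 1)]
      have ht : (r + 1).toNat = r.toNat + 1 := by omega
      rw [ht, List.getD_append _ _ _ _ (by simp [hL]; omega), List.getD_cons_succ]
      have hback : ((PySem.List.pyRange 0 n 1).map (pvCell gold dp c nxt)).getD r.toNat 0 =
          PySem.List.pyGetD ((PySem.List.pyRange 0 n 1).map (pvCell gold dp c nxt)) r 0 := by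
        rw [PySem.List.pyGetD_of_nonneg _ _ hr0]
      rw [hback, PySem.List.pyGetD_map_pyRange_of_nonneg _ _ _ _ hr0 h2']
      -- now: pvCell gold dp c nxt r = pvV … r c
      have e1 : PySem.List.pyGetD nxt r 0 = pvV gold dp n m ((m - (c+1)).toNat + 1) (r - 1) (c + 1) := by
        have := hrep (r - 1) (by omega) (by omega); simpa using this
      have e2 : PySem.List.pyGetD nxt (r + 1) 0 = pvV gold dp n m ((m - (c+1)).toNat + 1) r (c + 1) :=
        hrep r (by omega) (by omega)
      have e3 : PySem.List.pyGetD nxt (r + 2) 0 = pvV gold dp n m ((m - (c+1)).toNat + 1) (r + 1) (c + 1) := by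
        have := hrep (r + 1) (by omega) (by omega)
        rw [← this]; ring_nf
      have hb : ¬ (r < 0 ∨ r = n ∨ c = m) := by omega
      have hk : (m - c).toNat + 1 = ((m - (c + 1)).toNat + 1) + 1 := by omega
      rw [hk, pvV_eq, if_neg hb]
      by_cases hv : pvAt dp r c = -1
      · simp only [pvCell, hv, ne_eq, not_true_eq_false, if_false, if_true, e1, e2, e3]
        rw [max_right_comm]
      · simp [pvCell, hv]

lemma rep_fold (gold dp : List (List Int)) (n m y : Int) :
    ∀ (k : Nat) (c : Int) (nxt : List Int), c - y = (k : Int) → y ≤ c → c ≤ m →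
      pvRep gold dp n m c nxt →
      pvRep gold dp n m y
        ((PySem.List.pyRange (c - 1) (y - 1) (-1)).foldl
          (fun nxt c => 0 :: (PySem.List.pyRange 0 n 1).map (pvCell gold dp c nxt) ++ [0]) nxt) := by
  intro k
  induction k with
  | zero =>
    intro c nxt hk hyc hcm hrep
    have : c = y := by omega
    subst this
    rw [PySem.List.pyRange_neg_one_eq_nil (by omega)]
    simpa using hrep
  | succ k ih =>
    intro c nxt hk hyc hcm hrep
    rw [PySem.List.pyRange_neg_one_cons (by omega : y - 1 < c - 1), List.foldl_cons]
    have hstep := rep_step gold dp n m (c - 1) nxt (by omega)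
      (by rw [(by ring : c - 1 + 1 = c)]; exact hrep)
    have := ih (c - 1) _ (by omega) (by omega) (by omega) hstep
    simpa using this

-- ===== VERDICT (by name: the statement is the Claim_ definition above) =====
theorem collect_gold_spec : Claim_equal_collect_gold := by
  intro gold x y n m dp _ hpre
  unfold Spec_collect_gold
  rcases hpre with hb | ⟨hx0, hxn, hy0, hym, hg, hd, hgr, hdr⟩
  · -- base case: both programs return 0 immediately
    have hA : collect_gold gold x y n m dp = 0 := by
      unfold collect_gold
      simp only [collect_gold_go, if_pos hb]
    have hB : collect_gold_alt gold x y n m dp = 0 := by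
      unfold collect_gold_alt
      rw [if_pos hb]
    rw [hA, hB]
  · have hb : ¬ (x < 0 ∨ x = n ∨ y = m) := by omega
    have hInv0 : pvInv gold dp n m y dp := ⟨rfl, fun _ => rfl, fun _ _ _ _ _ _ => Or.inl rfl⟩
    have hA := (go_spec gold dp n m y hd hdr hy0 ((m - y).toNat + 1) x y dp hInv0 (by omega)
      (le_refl y) (by omega) (by omega) (by omega)).1
    have hfold := rep_fold gold dp n m y (m - y).toNat m (List.replicate (n + 2).toNat 0)
      (by omega) (by omega) (le_refl m) (rep_init gold dp n m (by omega))
    have hB : collect_gold_alt gold x y n m dp = pvV gold dp n m ((m - y).toNat + 1) x y := by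
      unfold collect_gold_alt
      rw [if_neg hb]
      exact hfold.2 x (by omega) (by omega)
    unfold collect_gold
    rw [hA, hB]
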